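-- pv_equiv track=rewrite | github.com/hchungdelta/Machine_Learning | seq2seq_model(madoka_magica)/read_txt.py | separate_into_phrase_and_index
-- ===== SOURCE A (Python) =====
-- def separate_into_phrase_and_index(input_txt, dictionary):
--     data_input_phrase=[]
--     data_input_index=[]
--     index_for_this_phrase=[]
--     phrase=''
--     num=0
--     for a in input_txt:
--         if a == '\n' :
--             num +=1
--             data_input_phrase.append(phrase)
--             data_input_index.append(index_for_this_phrase)
--             phrase=''
--             index_for_this_phrase=[]
--         else :
--             phrase+=str(a)
--             index_for_this_phrase.append(dictionary[a])
--     return data_input_phrase,data_input_index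
-- ===== SOURCE B (Python) =====
-- def separate_into_phrase_and_index(input_txt, dictionary):
--     segments = input_txt.split('\n')[:-1]
--     phrases = list(segments)
--     indices = [[dictionary[c] for c in seg] for seg in segments]
--     return phrases, indices
-- ===== Notes on version B (the rewrite author's own statement) =====
-- stated objective: simpler
-- what changed: B replaces A's character-by-character accumulate-and-flush loop (with phrase/index accumulators and a newline flush branch) by a split-then-process decomposition: split on '\n', drop the never-flushed trailing segment, and map each segment to itself and to its list of dictionary indices.
import Mathlib
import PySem

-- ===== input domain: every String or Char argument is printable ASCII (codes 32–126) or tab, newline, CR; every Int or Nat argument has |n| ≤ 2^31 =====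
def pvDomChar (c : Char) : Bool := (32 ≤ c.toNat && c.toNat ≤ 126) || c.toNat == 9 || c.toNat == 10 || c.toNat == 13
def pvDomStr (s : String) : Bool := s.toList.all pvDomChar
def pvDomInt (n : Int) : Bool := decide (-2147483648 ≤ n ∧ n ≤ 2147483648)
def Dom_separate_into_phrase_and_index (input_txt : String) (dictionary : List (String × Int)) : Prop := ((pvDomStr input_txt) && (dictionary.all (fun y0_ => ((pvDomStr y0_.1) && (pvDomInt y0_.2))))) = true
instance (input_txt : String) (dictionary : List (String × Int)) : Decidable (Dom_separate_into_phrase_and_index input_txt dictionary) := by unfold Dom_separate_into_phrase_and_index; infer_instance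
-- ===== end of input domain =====

-- B splits on '\n' and maps the segments instead of A's character-by-character
-- accumulate-and-flush loop (objective: simpler).

-- dictionary[a]: first-match lookup of the one-character key in the association list
def pvLookup (dictionary : List (String × Int)) (c : Char) : Option Int :=
  (dictionary.find? (fun p => p.1 == String.ofList [c])).map (·.2)

-- ===== PORT A =====
-- state: (data_input_phrase, data_input_index, phrase, index_for_this_phrase, num)
def separate_into_phrase_and_index (input_txt : String) (dictionary : List (String × Int)) : List String × List (List Int) :=
  let st := input_txt.toList.foldl
    (fun (st : List String × List (List Int) × String × List Int × Int) a =>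
      if a = '\n' then
        (st.1 ++ [st.2.2.1], st.2.1 ++ [st.2.2.2.1], "", [], st.2.2.2.2 + 1)
      else
        (st.1, st.2.1, st.2.2.1.push a, st.2.2.2.1 ++ [(pvLookup dictionary a).getD 0], st.2.2.2.2))
    ([], [], "", [], 0)
  (st.1, st.2.1)

-- ===== PORT B =====
-- hand port of str.split('\n') (exact: Python single-character split, "" ↦ [""])
def pySplitNl : List Char → List (List Char)
  | [] => [[]]
  | c :: cs => if c = '\n' then [] :: pySplitNl cs else (pySplitNl cs).modifyHead (c :: ·)

-- [:-1] on a list is List.dropLast (exact for every length)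
def separate_into_phrase_and_index_alt (input_txt : String) (dictionary : List (String × Int)) : List String × List (List Int) :=
  let segments := (pySplitNl input_txt.toList).dropLast
  (segments.map String.ofList,
   segments.map (fun seg => seg.map (fun c => (pvLookup dictionary c).getD 0)))

-- ===== PRECONDITION & SPEC =====
-- A raises KeyError iff some non-newline character of input_txt is missing from dictionary
def Pre_separate_into_phrase_and_index (input_txt : String) (dictionary : List (String × Int)) : Prop :=
  (input_txt.toList.all (fun c => c = '\n' || (pvLookup dictionary c).isSome)) = true
instance (input_txt : String) (dictionary : List (String × Int)) : Decidable (Pre_separate_into_phrase_and_index input_txt dictionary) := by unfold Pre_separate_into_phrase_and_index; infer_instance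
def pvWitness_separate_into_phrase_and_index : String × (List (String × Int)) := ("hi\nho\n", [("h", 0), ("i", 1), ("o", 2)])

def Spec_separate_into_phrase_and_index (input_txt : String) (dictionary : List (String × Int)) (out : List String × List (List Int)) : Prop := out = separate_into_phrase_and_index_alt input_txt dictionary
instance (input_txt : String) (dictionary : List (String × Int)) (out : List String × List (List Int)) : Decidable (Spec_separate_into_phrase_and_index input_txt dictionary out) := by unfold Spec_separate_into_phrase_and_index; infer_instance

-- ===== CLAIM (what is proved, stated in full; the proofs are below) =====
def Claim_equal_separate_into_phrase_and_index : Prop := ∀ (input_txt : String) (dictionary : List (String × Int)), Dom_separate_into_phrase_and_index input_txt dictionary → Pre_separate_into_phrase_and_index input_txt dictionary → Spec_separate_into_phrase_and_index input_txt dictionary (separate_into_phrase_and_index input_txt dictionary)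

-- ===== LEMMAS AND PROOFS =====
lemma pySplitNl_ne_nil (cs : List Char) : pySplitNl cs ≠ [] := by
  cases cs with
  | nil => simp [pySplitNl]
  | cons c cs =>
    simp only [pySplitNl]
    split
    · simp
    · cases h : pySplitNl cs with
      | nil => exact absurd h (pySplitNl_ne_nil cs)
      | cons s ss => simp [List.modifyHead]

lemma loop_eq (d : List (String × Int)) (cs : List Char) :
    ∀ (ps : List String) (is : List (List Int)) (ph : String) (idx : List Int) (num : Int),
    ∃ ph' idx' num',
      cs.foldl
        (fun (st : List String × List (List Int) × String × List Int × Int) a =>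
          if a = '\n' then
            (st.1 ++ [st.2.2.1], st.2.1 ++ [st.2.2.2.1], "", [], st.2.2.2.2 + 1)
          else
            (st.1, st.2.1, st.2.2.1.push a, st.2.2.2.1 ++ [(pvLookup d a).getD 0], st.2.2.2.2))
        (ps, is, ph, idx, num)
      = (ps ++ (((pySplitNl cs).modifyHead (ph.toList ++ ·)).dropLast).map String.ofList,
         is ++ (((pySplitNl cs).map (fun s => s.map (fun c => (pvLookup d c).getD 0))).modifyHead (idx ++ ·)).dropLast,
         ph', idx', num') := by
  induction cs with
  | nil =>
    intro ps is ph idx num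
    exact ⟨ph, idx, num, by simp [pySplitNl, List.modifyHead]⟩
  | cons c cs ih =>
    intro ps is ph idx num
    obtain ⟨s, ss, hsp⟩ : ∃ s ss, pySplitNl cs = s :: ss := by
      cases h : pySplitNl cs with
      | nil => exact absurd h (pySplitNl_ne_nil cs)
      | cons s ss => exact ⟨s, ss, rfl⟩
    by_cases hc : c = '\n'
    · subst hc
      simp only [List.foldl_cons]
      obtain ⟨ph', idx', num', h⟩ := ih (ps ++ [ph]) (is ++ [idx]) "" [] (num + 1)
      refine ⟨ph', idx', num', h.trans ?_⟩
      simp [pySplitNl, hsp, List.modifyHead]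
    · simp only [List.foldl_cons, if_neg hc]
      obtain ⟨ph', idx', num', h⟩ := ih ps is (ph.push c) (idx ++ [(pvLookup d c).getD 0]) num
      refine ⟨ph', idx', num', h.trans ?_⟩
      have hpush : (ph.push c).toList = ph.toList ++ [c] := String.toList_push c
      simp [pySplitNl, if_neg hc, hsp, List.modifyHead, hpush]

theorem separate_into_phrase_and_index_spec : Claim_equal_separate_into_phrase_and_index := by
  intro input_txt dictionary _ _
  unfold Spec_separate_into_phrase_and_index
  unfold separate_into_phrase_and_index separate_into_phrase_and_index_alt
  obtain ⟨ph', idx', num', h⟩ := loop_eq dictionary input_txt.toList [] [] "" [] 0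
  simp only [h]
  have hmh : ∀ (l : List (List Char)) (g : List Char → List Char), (∀ x, g x = x) → l.modifyHead g = l := by
    intro l g hg; cases l <;> simp [List.modifyHead, hg]
  have hmhI : ∀ (l : List (List Int)) (g : List Int → List Int), (∀ x, g x = x) → l.modifyHead g = l := by
    intro l g hg; cases l <;> simp [List.modifyHead, hg]
  rw [hmh _ _ (by intro x; simp), hmhI _ _ (by intro x; simp)]
  simp [List.map_dropLast]
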